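-- pv_equiv track=rewrite | github.com/fedjaf123/Srb1.2 | SRB1.2-razvoj.py | name_distance_ok
-- ===== SOURCE A (Python) =====
-- def normalize_text(value: str | None) -> str:
--     if not value:
--         return ""
--     return "".join(
--         ch.lower() for ch in str(value) if ch.isalnum() or ch.isspace()
--     ).strip()
--
-- def _levenshtein_leq_one(a: str, b: str) -> bool:
--     if a == b:
--         return True
--     if abs(len(a) - len(b)) > 1:
--         return False
--     if len(a) == len(b):
--         mismatches = 0
--         for ch1, ch2 in zip(a, b):
--             if ch1 != ch2:
--                 mismatches += 1
--                 if mismatches > 1: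
--                     return False
--         return True
--     if len(a) > len(b):
--         a, b = b, a
--     i = 0
--     j = 0
--     skips = 0
--     while i < len(a) and j < len(b):
--         if a[i] == b[j]:
--             i += 1
--             j += 1
--         else:
--             skips += 1
--             if skips > 1:
--                 return False
--             j += 1
--     return True
--
-- def name_distance_ok(a: str | None, b: str | None, max_distance: int = 1) -> bool:
--     if max_distance != 1:
--         raise ValueError("Only max_distance=1 is supported.")
--     a_norm = normalize_text(a)
--     b_norm = normalize_text(b)
--     if not a_norm or not b_norm:
--         return False
--     a_parts = [p for p in a_norm.split() if p]
--     b_parts = [p for p in b_norm.split() if p]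
--     if not a_parts or not b_parts:
--         return False
--     a_first = a_parts[0]
--     a_last = a_parts[-1] if len(a_parts) > 1 else a_parts[0]
--     b_first = b_parts[0]
--     b_last = b_parts[-1] if len(b_parts) > 1 else b_parts[0]
--     return _levenshtein_leq_one(a_first, b_first) and _levenshtein_leq_one(
--         a_last, b_last
--     )
-- ===== SOURCE B (Python) =====
-- def normalize_text(value):
--     if not value:
--         return ""
--     return "".join(
--         ch.lower() for ch in str(value) if ch.isalnum() or ch.isspace()
--     ).strip()
--
-- def _close(a, b):
--     if a == b:
--         return True
--     la, lb = len(a), len(b)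
--     if abs(la - lb) > 1:
--         return False
--     if la == lb:
--         return sum(c1 != c2 for c1, c2 in zip(a, b)) <= 1
--     s, l = (a, b) if la < lb else (b, a)
--     i = next((k for k in range(len(s)) if s[k] != l[k]), len(s))
--     return s[i:] == l[i + 1:]
--
-- def name_distance_ok(a, b, max_distance=1):
--     if max_distance != 1:
--         raise ValueError("Only max_distance=1 is supported.")
--     pa = normalize_text(a).split()
--     pb = normalize_text(b).split()
--     if not pa or not pb:
--         return False
--     return _close(pa[0], pb[0]) and _close(pa[-1], pb[-1])
-- ===== Notes on version B (the rewrite author's own statement) =====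
-- stated objective: simpler
-- what changed: the bounded edit-distance check drops the stateful loops: equal-length strings are compared by counting mismatches over zip, and lengths differing by 1 by a first-mismatch index plus one suffix-slice comparison, replacing A's early-return mismatch loop and greedy two-pointer/skip-counter scan; the redundant empty-part filter and the length-dependent first/last selection collapse to split() and parts[0]/parts[-1].
import Mathlib
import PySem

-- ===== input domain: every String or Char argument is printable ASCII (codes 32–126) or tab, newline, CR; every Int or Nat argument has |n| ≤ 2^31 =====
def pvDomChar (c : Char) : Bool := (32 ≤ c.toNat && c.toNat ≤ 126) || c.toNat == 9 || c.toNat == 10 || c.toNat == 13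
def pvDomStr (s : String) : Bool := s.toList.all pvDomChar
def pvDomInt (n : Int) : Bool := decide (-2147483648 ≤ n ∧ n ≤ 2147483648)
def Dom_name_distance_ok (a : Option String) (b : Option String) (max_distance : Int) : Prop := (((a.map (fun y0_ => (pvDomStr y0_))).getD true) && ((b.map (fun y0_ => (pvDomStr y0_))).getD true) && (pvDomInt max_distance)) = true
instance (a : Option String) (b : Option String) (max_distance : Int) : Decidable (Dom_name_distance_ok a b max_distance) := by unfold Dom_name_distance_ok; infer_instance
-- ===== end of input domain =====

-- B replaces A's stateful bounded-edit-distance loops by a mismatch count (equal lengths) and a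
-- first-mismatch index plus suffix comparison (lengths differing by 1); objective: simpler.

-- shared module helper normalize_text (identical source in A and B)
def pvNorm (v : Option String) : List Char :=
  match v with
  | none => []
  | some s =>
      if s.toList.isEmpty then []
      else PySem.Chars.strip
        ((s.toList.filter (fun ch => PySem.Chars.isalnum ch || PySem.Chars.isspace ch)).map
          PySem.Chars.lowerChar)

-- ===== PORT A =====
-- equal-length mismatch loop of _levenshtein_leq_one (early return when mismatches > 1)
def pvEqLoopA : List (Char × Char) → Nat → Bool
  | [], _ => true
  | (c1, c2) :: rest, m =>
      if c1 ≠ c2 then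
        if m + 1 > 1 then false else pvEqLoopA rest (m + 1)
      else pvEqLoopA rest m

-- the while-loop of _levenshtein_leq_one (i/j pointers become the two list suffixes)
def pvSkipLoopA : List Char → List Char → Nat → Bool
  | [], _, _ => true
  | _ :: _, [], _ => true
  | x :: xs, y :: ys, skips =>
      if x = y then pvSkipLoopA xs ys skips
      else if skips + 1 > 1 then false
      else pvSkipLoopA (x :: xs) ys (skips + 1)
  termination_by a b _ => a.length + b.length

def pvLevA (a b : List Char) : Bool :=
  if a = b then true
  else if 1 < ((a.length : Int) - (b.length : Int)).natAbs then false
  else if a.length = b.length then pvEqLoopA (a.zip b) 0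
  else if a.length > b.length then pvSkipLoopA b a 0
  else pvSkipLoopA a b 0

def name_distance_ok (a : Option String) (b : Option String) (max_distance : Int) : Bool :=
  if max_distance ≠ 1 then false  -- Python raises ValueError here; excluded by Pre_
  else
    let a_norm := pvNorm a
    let b_norm := pvNorm b
    if a_norm.isEmpty || b_norm.isEmpty then false
    else
      let a_parts := (PySem.Chars.split₀ a_norm).filter (fun p => !p.isEmpty)
      let b_parts := (PySem.Chars.split₀ b_norm).filter (fun p => !p.isEmpty)
      if a_parts.isEmpty || b_parts.isEmpty then false
      else
        let a_first := PySem.List.pyGetD a_parts 0 []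
        let a_last := if 1 < a_parts.length then PySem.List.pyGetD a_parts (-1) []
                      else PySem.List.pyGetD a_parts 0 []
        let b_first := PySem.List.pyGetD b_parts 0 []
        let b_last := if 1 < b_parts.length then PySem.List.pyGetD b_parts (-1) []
                      else PySem.List.pyGetD b_parts 0 []
        pvLevA a_first b_first && pvLevA a_last b_last

-- ===== PORT B =====
-- next((k for k in range(len(s)) if s[k] != l[k]), len(s)) with s the shorter list
def pvMismatchIdx : List Char → List Char → Nat
  | x :: _xs, y :: _ys => if x = y then pvMismatchIdx _xs _ys + 1 else 0
  | _, _ => 0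

def pvLevB (a b : List Char) : Bool :=
  if a = b then true
  else
    let la := a.length
    let lb := b.length
    if 1 < ((la : Int) - (lb : Int)).natAbs then false
    else if la = lb then (a.zip b).countP (fun p => p.1 ≠ p.2) ≤ 1
    else
      let sl := if la < lb then (a, b) else (b, a)
      let i := pvMismatchIdx sl.1 sl.2
      -- s[i:] and l[i+1:] with 0 ≤ i: exact as List.drop
      sl.1.drop i == sl.2.drop (i + 1)

def name_distance_ok_alt (a : Option String) (b : Option String) (max_distance : Int) : Bool :=
  if max_distance ≠ 1 then false  -- Python raises ValueError here; excluded by Pre_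
  else
    let pa := PySem.Chars.split₀ (pvNorm a)
    let pb := PySem.Chars.split₀ (pvNorm b)
    if pa.isEmpty || pb.isEmpty then false
    else
      pvLevB (PySem.List.pyGetD pa 0 []) (PySem.List.pyGetD pb 0 []) &&
      pvLevB (PySem.List.pyGetD pa (-1) []) (PySem.List.pyGetD pb (-1) [])

-- ===== PRECONDITION & SPEC =====
-- Pre_ excludes exactly the inputs where A raises ValueError (max_distance ≠ 1); A is total otherwise.
def Pre_name_distance_ok (a : Option String) (b : Option String) (max_distance : Int) : Prop :=
  max_distance = 1
instance (a : Option String) (b : Option String) (max_distance : Int) : Decidable (Pre_name_distance_ok a b max_distance) := by unfold Pre_name_distance_ok; infer_instance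

def pvWitness_name_distance_ok : Option String × Option String × Int :=
  (some "Jon  Smith", some "john smyth", 1)

def Spec_name_distance_ok (a : Option String) (b : Option String) (max_distance : Int) (out : Bool) : Prop := out = name_distance_ok_alt a b max_distance
instance (a : Option String) (b : Option String) (max_distance : Int) (out : Bool) : Decidable (Spec_name_distance_ok a b max_distance out) := by unfold Spec_name_distance_ok; infer_instance

-- ===== CLAIM (what is proved, stated in full; the proofs are below) =====
def Claim_equal_name_distance_ok : Prop := ∀ (a : Option String) (b : Option String) (max_distance : Int), Dom_name_distance_ok a b max_distance → Pre_name_distance_ok a b max_distance → Spec_name_distance_ok a b max_distance (name_distance_ok a b max_distance)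

-- ===== LEMMAS AND PROOFS =====

lemma pvEqLoopA_eq (ps : List (Char × Char)) (m : Nat) (hm : m ≤ 1) :
    pvEqLoopA ps m = decide (m + ps.countP (fun p => p.1 ≠ p.2) ≤ 1) := by
  induction ps generalizing m with
  | nil => simp [pvEqLoopA, hm]
  | cons p rest ih =>
      obtain ⟨c1, c2⟩ := p
      by_cases h : c1 = c2
      · simp [pvEqLoopA, h, ih m hm]
      · interval_cases m <;>
          simp [pvEqLoopA, h, ih 1 (by omega)]

lemma pvSkipLoopA_one (a b : List Char) (h : a.length = b.length) :
    pvSkipLoopA a b 1 = decide (a = b) := by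
  induction a generalizing b with
  | nil => cases b with
      | nil => simp [pvSkipLoopA]
      | cons y ys => simp at h
  | cons x xs ih =>
      cases b with
      | nil => simp at h
      | cons y ys =>
          by_cases hxy : x = y
          · subst hxy
            simp only [pvSkipLoopA]
            simp [ih ys (by simpa using h)]
          · simp [pvSkipLoopA, hxy]

lemma pvSkipLoopA_zero (a b : List Char) (h : b.length = a.length + 1) :
    pvSkipLoopA a b 0 =
      (a.drop (pvMismatchIdx a b) == b.drop (pvMismatchIdx a b + 1)) := by
  induction a generalizing b with
  | nil =>
      cases b with
      | nil => simp at h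
      | cons y ys =>
          cases ys with
          | nil => simp [pvSkipLoopA, pvMismatchIdx]
          | cons z zs => simp at h
  | cons x xs ih =>
      cases b with
      | nil => simp at h
      | cons y ys =>
          by_cases hxy : x = y
          · subst hxy
            simp only [pvSkipLoopA, pvMismatchIdx]
            rw [ih ys (by simpa using h)]
            simp
          · simp only [pvSkipLoopA, if_neg hxy, pvMismatchIdx]
            rw [pvSkipLoopA_one (x :: xs) ys (by simpa using h.symm)]
            rw [if_neg (by omega : ¬ (0 + 1 > 1)), List.drop_zero, List.drop_one, List.tail_cons]
            exact Eq.symm (Bool.beq_eq_decide_eq _ _)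

lemma pvLev_eq (a b : List Char) : pvLevA a b = pvLevB a b := by
  unfold pvLevA pvLevB
  by_cases hab : a = b
  · simp [hab]
  · simp only [if_neg hab]
    by_cases hfar : 1 < ((a.length : Int) - (b.length : Int)).natAbs
    · simp [hfar]
    · simp only [if_neg hfar]
      by_cases hlen : a.length = b.length
      · simp [hlen, pvEqLoopA_eq (a.zip b) 0 (by omega)]
      · simp only [if_neg hlen]
        by_cases hgt : a.length > b.length
        · have hlt : ¬ a.length < b.length := by omega
          have hone : a.length = b.length + 1 := by omega
          simp only [if_pos hgt, if_neg hlt]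
          exact pvSkipLoopA_zero b a hone
        · have hlt : a.length < b.length := by omega
          have hone : b.length = a.length + 1 := by omega
          simp only [if_neg hgt, if_pos hlt]
          exact pvSkipLoopA_zero a b hone

lemma split₀_go_ne_nil (s : List Char) : ∀ (cur : List Char) (acc : List (List Char)), (∀ x ∈ acc, x ≠ ([] : List Char)) → ∀ x ∈ PySem.Chars.split₀.go s cur acc, x ≠ ([] : List Char) := by
  induction s with
  | nil =>
      intro cur acc hacc x hx
      by_cases hc : cur.isEmpty
      · simp only [PySem.Chars.split₀.go, hc, if_true, List.mem_reverse] at hx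
        exact hacc x hx
      · simp only [PySem.Chars.split₀.go, hc, Bool.false_eq_true, if_false] at hx
        rw [List.mem_reverse, List.mem_cons] at hx
        rcases hx with h | h
        · subst h; simpa using fun h' => hc (by simp [- List.reverse_eq_nil_iff, h'])
        · exact hacc x h
  | cons c rest ih =>
      intro cur acc hacc x hx
      by_cases hs : PySem.Chars.isspace c
      · by_cases hc : cur.isEmpty
        · simp only [PySem.Chars.split₀.go, hs, hc, if_true] at hx
          exact ih [] acc hacc x hx
        · simp only [PySem.Chars.split₀.go, hs, hc, Bool.false_eq_true, if_true, if_false] at hx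
          refine ih [] (cur.reverse :: acc) ?_ x hx
          intro y hy
          rcases List.mem_cons.mp hy with h | h
          · subst h; simpa using fun h' => hc (by simp [- List.reverse_eq_nil_iff, h'])
          · exact hacc y h
      · simp only [PySem.Chars.split₀.go, hs, Bool.false_eq_true, if_false] at hx
        exact ih (c :: cur) acc hacc x hx

lemma split₀_ne_nil (s : List Char) : ∀ x ∈ PySem.Chars.split₀ s, x ≠ ([] : List Char) := by
  intro x hx
  exact split₀_go_ne_nil s [] [] (by simp) x hx

lemma filter_split₀ (s : List Char) :
    (PySem.Chars.split₀ s).filter (fun p => !p.isEmpty) = PySem.Chars.split₀ s := by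
  apply List.filter_eq_self.mpr
  intro x hx
  simpa using split₀_ne_nil s x hx

lemma lastD_eq (p : List (List Char)) (hp : p ≠ []) :
    (if 1 < p.length then PySem.List.pyGetD p (-1) ([] : List Char)
     else PySem.List.pyGetD p 0 []) = PySem.List.pyGetD p (-1) [] := by
  by_cases hlen : 1 < p.length
  · simp [hlen]
  · match p, hp with
    | [x], _ => rfl
    | y :: z :: t, _ => simp at hlen

-- ===== VERDICT (by name: the statement is the Claim_ definition above) =====
theorem name_distance_ok_spec : Claim_equal_name_distance_ok := by
  intro a b md _ hpre
  unfold Spec_name_distance_ok name_distance_ok name_distance_ok_alt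
  subst hpre
  simp only [if_neg (by omega : ¬ ((1 : Int) ≠ 1))]
  simp only [filter_split₀]
  by_cases hA : PySem.Chars.split₀ (pvNorm a) = []
  · simp [hA]
  · by_cases hB : PySem.Chars.split₀ (pvNorm b) = []
    · simp [hB]
    · have hna : pvNorm a ≠ [] := fun h => hA (by rw [h]; rfl)
      have hnb : pvNorm b ≠ [] := fun h => hB (by rw [h]; rfl)
      simp [hA, hB, hna, hnb, List.isEmpty_iff, lastD_eq _ hA, lastD_eq _ hB, pvLev_eq]
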